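-- pv_equiv track=rewrite | github.com/TommyW427/Artificial-Intelligence-1-2 | Othello/SiteCompatibleOthello.py | capturability
-- ===== SOURCE A (Python) =====
-- def capturability(board,color,revFlipped):
--    nonCapturable = 0
--    rSetFlipped = set()
--    for z in revFlipped:
--       rSetFlipped = rSetFlipped.union(set(z))
--    for z in range(len(board)):
--       if board[z] == color:
--          if not z in rSetFlipped:
--             nonCapturable+=1
--          else:
--             nonCapturable-=1
--    return nonCapturable
-- ===== SOURCE B (Python) =====
-- def capturability(board, color, revFlipped):
--     flipped = {z for zs in revFlipped for z in zs}
--     total = board.count(color)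
--     n = len(board)
--     captured = sum(1 for z in flipped if 0 <= z < n and board[z] == color)
--     return total - 2 * captured
-- ===== Notes on version B (the rewrite author's own statement) =====
-- stated objective: simpler
-- what changed: Replaces A's single +1/-1 branching scan over all board indices by two plain counts — total = board.count(color) and captured = flipped-set positions holding that color — returning total - 2*captured.
import Mathlib
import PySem

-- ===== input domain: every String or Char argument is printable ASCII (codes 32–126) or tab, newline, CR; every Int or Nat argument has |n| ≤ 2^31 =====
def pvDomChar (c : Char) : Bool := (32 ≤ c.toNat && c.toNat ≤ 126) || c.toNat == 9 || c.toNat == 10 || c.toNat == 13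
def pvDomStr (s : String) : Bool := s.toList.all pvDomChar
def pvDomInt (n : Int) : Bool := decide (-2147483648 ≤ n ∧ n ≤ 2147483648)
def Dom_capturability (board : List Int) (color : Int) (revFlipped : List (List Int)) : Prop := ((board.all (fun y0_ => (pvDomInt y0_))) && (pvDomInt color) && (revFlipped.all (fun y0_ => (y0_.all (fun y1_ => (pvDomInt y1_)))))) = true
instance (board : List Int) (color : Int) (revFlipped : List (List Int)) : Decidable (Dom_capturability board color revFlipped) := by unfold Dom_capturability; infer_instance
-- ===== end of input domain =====

-- B is a simpler decomposition: total count of the color minus twice the count of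
-- flipped pieces of the color, instead of A's +1/-1 branching index scan.

-- ===== PORT A =====
def capturability (board : List Int) (color : Int) (revFlipped : List (List Int)) : Int :=
  let rSetFlipped : PySem.Set Int :=
    revFlipped.foldl (fun s z => PySem.Set.union s (PySem.Set.ofList z)) PySem.Set.empty
  (PySem.List.pyRange 0 (board.length : Int) 1).foldl (fun acc z =>
    if PySem.List.pyGetD board z 0 = color then
      if !(PySem.Set.contains rSetFlipped z) then acc + 1 else acc - 1
    else acc) 0

-- ===== PORT B =====
def capturability_alt (board : List Int) (color : Int) (revFlipped : List (List Int)) : Int :=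
  let flipped : PySem.Set Int := PySem.Set.ofList (revFlipped.flatMap id)
  let total : Int := PySem.List.count board color
  let n : Int := (board.length : Int)
  let captured : Int :=
    ((flipped.filter (fun z => decide (0 ≤ z) && decide (z < n) &&
        decide (PySem.List.pyGetD board z 0 = color))).length : Int)
  total - 2 * captured

-- ===== PRECONDITION & SPEC =====
def Spec_capturability (board : List Int) (color : Int) (revFlipped : List (List Int)) (out : Int) : Prop := out = capturability_alt board color revFlipped
instance (board : List Int) (color : Int) (revFlipped : List (List Int)) (out : Int) : Decidable (Spec_capturability board color revFlipped out) := by unfold Spec_capturability; infer_instance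

-- ===== CLAIM (what is proved, stated in full; the proofs are below) =====
def Claim_equal_capturability : Prop := ∀ (board : List Int) (color : Int) (revFlipped : List (List Int)), Dom_capturability board color revFlipped → Spec_capturability board color revFlipped (capturability board color revFlipped)

-- ===== LEMMAS AND PROOFS =====

-- membership in A's union-fold set is membership in the flattened list
theorem pv_mem_foldl_union (rf : List (List Int)) (s : PySem.Set Int) (y : Int) :
    y ∈ rf.foldl (fun s z => PySem.Set.union s (PySem.Set.ofList z)) s ↔
      y ∈ s ∨ y ∈ rf.flatMap id := by
  induction rf generalizing s with
  | nil => simp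
  | cons z rf ih =>
    simp only [List.foldl_cons, ih, List.flatMap_cons, List.mem_append,
      PySem.Set.mem_union, PySem.Set.mem_ofList, id]
    tauto

theorem pv_nodup_foldl_union (rf : List (List Int)) (s : PySem.Set Int) (hs : s.Nodup) :
    (rf.foldl (fun s z => PySem.Set.union s (PySem.Set.ofList z)) s).Nodup := by
  induction rf generalizing s with
  | nil => exact hs
  | cons z rf ih => exact ih _ (PySem.Set.nodup_union _ _ hs)

-- countP of p splits into the q-part and the not-q-part
theorem pv_countP_split (l : List Int) (p q : Int → Bool) :
    l.countP (fun z => p z && !(q z)) + l.countP (fun z => p z && q z) = l.countP p := by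
  induction l with
  | nil => rfl
  | cons x l ih =>
    simp only [List.countP_cons]
    by_cases hp : p x <;> by_cases hq : q x <;> simp [hp, hq] <;> omega

-- sum of a difference of 0/1 indicators is a difference of countPs
theorem pv_sum_ite_sub (l : List Int) (p q : Int → Bool) :
    (l.map (fun z => (if p z then (1:Int) else 0) - (if q z then 1 else 0))).sum =
      (l.countP p : Int) - (l.countP q : Int) := by
  induction l with
  | nil => simp
  | cons x l ih =>
    simp only [List.map_cons, List.sum_cons, ih, List.countP_cons]
    by_cases hp : p x <;> by_cases hq : q x <;> simp [hp, hq]  <;> ring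

theorem capturability_eq (board : List Int) (color : Int) (revFlipped : List (List Int)) :
    capturability board color revFlipped = capturability_alt board color revFlipped := by
  unfold capturability capturability_alt
  dsimp only
  set S : PySem.Set Int :=
    revFlipped.foldl (fun s z => PySem.Set.union s (PySem.Set.ofList z)) PySem.Set.empty with hS
  set n : Int := (board.length : Int) with hn
  set c : Int → Bool := fun z => decide (PySem.List.pyGetD board z 0 = color) with hc
  have hmemS : ∀ y, y ∈ S ↔ y ∈ revFlipped.flatMap id := by
    intro y
    rw [hS, pv_mem_foldl_union]
    simp [PySem.Set.empty]
  have hnodS : S.Nodup := pv_nodup_foldl_union _ _ (by simp [PySem.Set.empty])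
  -- 1. turn A's loop into a sum of indicator differences
  have hstep : (fun (acc : Int) (z : Int) =>
      if PySem.List.pyGetD board z 0 = color then
        if !(PySem.Set.contains S z) then acc + 1 else acc - 1
      else acc) =
      fun acc z => acc + ((if (c z && !(PySem.Set.contains S z)) then (1:Int) else 0) -
                          (if (c z && PySem.Set.contains S z) then 1 else 0)) := by
    funext acc z
    by_cases h1 : PySem.List.pyGetD board z 0 = color <;>
      by_cases h2 : z ∈ S <;> simp [hc, h1, h2] <;> ring
  rw [hstep, PySem.List.foldl_add, pv_sum_ite_sub]
  -- 2. the plus-branch countP is total count minus the minus-branch countP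
  have hsplit : (PySem.List.pyRange 0 n 1).countP (fun z => c z && !(PySem.Set.contains S z)) +
      (PySem.List.pyRange 0 n 1).countP (fun z => c z && PySem.Set.contains S z) =
      (PySem.List.pyRange 0 n 1).countP c := by
    exact pv_countP_split _ _ _
  -- 3. total countP over the index range is board.count color
  have htotal : (PySem.List.pyRange 0 n 1).countP c = board.count color := by
    have hmp := PySem.List.map_pyGetD_pyRange_zero' (xs := board) (d := 0)
    calc (PySem.List.pyRange 0 n 1).countP c
        = ((PySem.List.pyRange 0 n 1).map (fun j => PySem.List.pyGetD board j 0)).countP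
            (fun v => decide (v = color)) := by rw [List.countP_map]; rfl
      _ = board.countP (fun v => decide (v = color)) := by rw [hmp]
      _ = board.count color := by
            rw [List.count]; apply List.countP_congr; intro v _; simp
  -- 4. the minus-branch countP equals B's captured length (same finite set, both nodup)
  have hcap : ((PySem.List.pyRange 0 n 1).countP (fun z => c z && PySem.Set.contains S z) : Int) =
      (((PySem.Set.ofList (revFlipped.flatMap id)).filter (fun z => decide (0 ≤ z) && decide (z < n) &&
        decide (PySem.List.pyGetD board z 0 = color))).length : Int) := by
    rw [List.countP_eq_length_filter]
    congr 1
    apply List.Perm.length_eq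
    rw [List.perm_ext_iff_of_nodup
      (List.Nodup.filter _ (PySem.List.nodup_pyRange_one 0 n))
      (List.Nodup.filter _ (PySem.Set.nodup_ofList _))]
    intro z
    simp only [List.mem_filter, PySem.List.mem_pyRange_one, PySem.Set.mem_ofList,
      Bool.and_eq_true, decide_eq_true_eq, PySem.Set.contains_iff, hmemS, hc]
    tauto
  rw [zero_add]
  have hminus : ((PySem.List.pyRange 0 n 1).countP (fun z => c z && !(PySem.Set.contains S z)) : Int) =
      (board.count color : Int) - ((PySem.List.pyRange 0 n 1).countP (fun z => c z && PySem.Set.contains S z) : Int) := by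
    rw [← htotal, ← hsplit]; push_cast; ring
  rw [hminus, hcap, PySem.List.count_eq]
  ring

-- ===== VERDICT (by name: the statement is the Claim_ definition above) =====
theorem capturability_spec : Claim_equal_capturability := by
  intro board color revFlipped _
  exact capturability_eq board color revFlipped
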